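-- pv_equiv track=rewrite | github.com/noelbohlin/CS50P | Problem Set 2/plates/plates.py | numberplacement
-- ===== SOURCE A (Python) =====
-- def numberplacement(plate):
--     """
--     Checks the placement of numbers in the given plate string.
--
--     Parameters:
--     plate (str): The plate string to check.
--
--     Returns:
--     bool: True if the placement of numbers is valid, False otherwise.
--     """
--     numberfound = False
--     for character in plate:
--         if character.isdigit():
--             if character == "0":
--                 if not numberfound:
--                     return False
--             numberfound = True
--         elif character.isalpha():
--             if numberfound:
--                 return False
--         else:
--             return False
--     return True
-- ===== SOURCE B (Python) =====
-- def numberplacement(plate):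
--     for i, c in enumerate(plate):
--         if c.isdigit():
--             return c != "0" and plate[i:].isdigit()
--         if not c.isalpha():
--             return False
--     return True
-- ===== Notes on version B (the rewrite author's own statement) =====
-- stated objective: simpler
-- what changed: Replaces the numberfound boolean state machine with an alpha-prefix scan that stops at the first digit and delegates the whole remaining suffix to one str.isdigit call.
import Mathlib
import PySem

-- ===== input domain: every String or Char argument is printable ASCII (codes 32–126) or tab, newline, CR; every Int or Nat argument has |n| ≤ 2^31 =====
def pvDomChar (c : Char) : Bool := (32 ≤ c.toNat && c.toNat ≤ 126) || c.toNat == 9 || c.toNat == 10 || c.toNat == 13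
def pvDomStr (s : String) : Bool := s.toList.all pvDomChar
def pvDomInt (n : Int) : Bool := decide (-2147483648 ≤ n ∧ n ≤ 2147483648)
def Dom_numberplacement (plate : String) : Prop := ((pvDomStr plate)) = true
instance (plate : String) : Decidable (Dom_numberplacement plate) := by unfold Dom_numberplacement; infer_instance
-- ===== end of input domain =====

-- B replaces A's numberfound state machine by an alpha-prefix scan that stops at the
-- first digit and checks the whole remaining suffix with one isdigit call (objective: simpler).

-- ===== PORT A =====
-- loop over the characters carrying the numberfound flag, branches in A's order
def numberplacementGo (numberfound : Bool) : List Char → Bool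
  | [] => true
  | c :: rest =>
    if PySem.Chars.isdigit c then
      if c = '0' then
        if !numberfound then false
        else numberplacementGo true rest
      else numberplacementGo true rest
    else if PySem.Chars.isalpha c then
      if numberfound then false
      else numberplacementGo numberfound rest
    else false

def numberplacement (plate : String) : Bool :=
  numberplacementGo false plate.toList

-- ===== PORT B =====
-- scan the prefix; at the first digit the remaining suffix plate[i:] is exactly c :: rest
def numberplacementAltGo : List Char → Bool
  | [] => true
  | c :: rest =>
    if PySem.Chars.isdigit c then
      (c ≠ '0') && PySem.Chars.strIsdigit (c :: rest)
    else if PySem.Chars.isalpha c then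
      numberplacementAltGo rest
    else false

def numberplacement_alt (plate : String) : Bool :=
  numberplacementAltGo plate.toList

-- ===== PRECONDITION & SPEC =====
def Spec_numberplacement (plate : String) (out : Bool) : Prop := out = numberplacement_alt plate
instance (plate : String) (out : Bool) : Decidable (Spec_numberplacement plate out) := by unfold Spec_numberplacement; infer_instance

-- ===== CLAIM (what is proved, stated in full; the proofs are below) =====
def Claim_equal_numberplacement : Prop := ∀ (plate : String), Dom_numberplacement plate → Spec_numberplacement plate (numberplacement plate)

-- ===== LEMMAS AND PROOFS =====

-- after the first digit, A accepts exactly an all-digit remainder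
theorem numberplacementGo_true (l : List Char) :
    numberplacementGo true l = l.all PySem.Chars.isdigit := by
  induction l with
  | nil => rfl
  | cons c rest ih =>
    by_cases hd : PySem.Chars.isdigit c = true
    · by_cases h0 : c = '0' <;>
        simp [numberplacementGo, hd, h0, ih]
    · by_cases ha : PySem.Chars.isalpha c = true <;>
        simp [numberplacementGo, hd, ha, List.all_cons]

theorem go_eq (l : List Char) :
    numberplacementGo false l = numberplacementAltGo l := by
  induction l with
  | nil => rfl
  | cons c rest ih =>
    by_cases hd : PySem.Chars.isdigit c = true
    · by_cases h0 : c = '0'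
      · simp [numberplacementGo, numberplacementAltGo, h0, ih,
          show PySem.Chars.isdigit '0' = true from by decide]
      · simp [numberplacementGo, numberplacementAltGo, hd, h0,
          numberplacementGo_true, PySem.Chars.strIsdigit, List.all_cons]
    · by_cases ha : PySem.Chars.isalpha c = true <;>
        simp [numberplacementGo, numberplacementAltGo, hd, ha, ih]

-- ===== VERDICT (by name: the statement is the Claim_ definition above) =====
theorem numberplacement_spec : Claim_equal_numberplacement := by
  intro plate _
  unfold Spec_numberplacement numberplacement numberplacement_alt
  exact go_eq plate.toList
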